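-- pv_equiv track=rewrite | github.com/haku-c/LeetCodePractice | PythonSolutions/LC1829.py | getMaximumXor
-- ===== SOURCE A (Python) =====
-- from typing import List
--
-- def getMaximumXor(nums: List[int], maximumBit: int) -> List[int]:
--     n = len(nums)
--     prefix = nums[0]
--     for i in range(1, len(nums)):
--         prefix = nums[i] ^ prefix
--     res = [0] * n
--     maximum = int("1" * (maximumBit), 2)
--
--     for i in range(n):
--         res[i] = maximum - prefix
--         prefix = prefix ^ nums[n - 1 - i]
--
--     return res
-- ===== SOURCE B (Python) =====
-- from typing import List
--
-- def getMaximumXor(nums: List[int], maximumBit: int) -> List[int]: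
--     maximum = (1 << maximumBit) - 1
--     prefixes = []
--     acc = 0
--     for x in nums:
--         acc ^= x
--         prefixes.append(acc)
--     return [maximum - p for p in reversed(prefixes)]
-- ===== Notes on version B (the rewrite author's own statement) =====
-- stated objective: idiomatic
-- what changed: B builds the forward prefix-XOR table in one pass and maps maximum - p over its reverse, instead of A's pre-computing the total XOR and then incrementally XOR-ing out the last elements while filling a preallocated result array by index.
-- crash fix: A raises IndexError on empty nums and ValueError on maximumBit <= 0 (int('',2)); for maximumBit >= 0, B returns [] on empty nums and, when maximumBit == 0, the list with maximum = 0. — e.g. on getMaximumXor([], 3): A raises IndexError, B returns []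
import Mathlib
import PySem

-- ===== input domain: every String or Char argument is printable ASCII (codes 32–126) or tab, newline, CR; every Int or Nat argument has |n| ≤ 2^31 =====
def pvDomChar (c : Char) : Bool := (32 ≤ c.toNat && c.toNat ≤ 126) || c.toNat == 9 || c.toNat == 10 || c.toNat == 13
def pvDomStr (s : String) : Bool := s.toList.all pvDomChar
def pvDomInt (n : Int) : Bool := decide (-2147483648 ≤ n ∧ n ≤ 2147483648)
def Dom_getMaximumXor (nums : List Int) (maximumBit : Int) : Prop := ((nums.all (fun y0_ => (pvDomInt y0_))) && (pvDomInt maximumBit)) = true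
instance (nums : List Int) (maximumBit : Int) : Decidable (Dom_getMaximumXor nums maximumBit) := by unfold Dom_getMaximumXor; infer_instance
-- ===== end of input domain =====

-- B replaces A's total-XOR + incremental peel-off loop by a forward prefix-XOR table
-- reversed and mapped (idiomatic, same O(n) cost); equivalence is about return values.

-- ===== PORT A =====
-- int("1" * maximumBit, 2): exact binary parse of a string of maximumBit '1' digits
-- (acc := 2*acc + 1 per digit); for maximumBit ≤ 0 Python raises ValueError (outside Pre_).
def pvOnes (k : Nat) : Int := (List.replicate k ()).foldl (fun a _ => 2 * a + 1) 0

def getMaximumXor (nums : List Int) (maximumBit : Int) : List Int :=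
  let n : Nat := nums.length
  -- nums[0]: IndexError on empty nums is excluded by Pre_; pyGetD with default 0
  let prefix0 : Int := PySem.List.pyGetD nums 0 0
  let prefix1 : Int :=
    (PySem.List.pyRange 1 (n : Int) 1).foldl
      (fun p i => PySem.Int.bxor (PySem.List.pyGetD nums i 0) p) prefix0
  let maximum : Int := pvOnes maximumBit.toNat
  ((PySem.List.pyRange 0 (n : Int) 1).foldl
      (fun (st : List Int × Int) i =>
        (st.1 ++ [maximum - st.2],
         PySem.Int.bxor st.2 (PySem.List.pyGetD nums ((n : Int) - 1 - i) 0)))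
      ([], prefix1)).1

-- ===== PORT B =====
def getMaximumXor_alt (nums : List Int) (maximumBit : Int) : List Int :=
  let maximum : Int := 2 ^ maximumBit.toNat - 1   -- (1 << maximumBit) - 1; negative shift raises (outside Pre_)
  let prefixes : List Int :=
    (nums.foldl (fun (st : List Int × Int) x =>
        (st.1 ++ [PySem.Int.bxor st.2 x], PySem.Int.bxor st.2 x)) ([], 0)).1
  prefixes.reverse.map (fun p => maximum - p)

-- ===== PRECONDITION & SPEC =====
-- Pre_ excludes exactly the inputs where A raises: empty nums (IndexError at nums[0])
-- and maximumBit ≤ 0 (ValueError from int("", 2)).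
def Pre_getMaximumXor (nums : List Int) (maximumBit : Int) : Prop :=
  nums ≠ [] ∧ 1 ≤ maximumBit
instance (nums : List Int) (maximumBit : Int) : Decidable (Pre_getMaximumXor nums maximumBit) := by
  unfold Pre_getMaximumXor; infer_instance

def pvWitness_getMaximumXor : List Int × Int := ([0, 1, 1, 3], 2)

-- A raises (IndexError on empty nums, ValueError for maximumBit = 0); B returns the
-- prefix-table answer there: [] on empty nums, and with maximum = 0 when maximumBit = 0.
def Raises_getMaximumXor (nums : List Int) (maximumBit : Int) : Prop :=
  0 ≤ maximumBit ∧ (nums = [] ∨ maximumBit = 0)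
instance (nums : List Int) (maximumBit : Int) : Decidable (Raises_getMaximumXor nums maximumBit) := by
  unfold Raises_getMaximumXor; infer_instance
def pvRaiseWitness_getMaximumXor : List Int × Int := ([], 3)
def pvRaiseWitnessOut_getMaximumXor : List Int := []

def Spec_getMaximumXor (nums : List Int) (maximumBit : Int) (out : List Int) : Prop := out = getMaximumXor_alt nums maximumBit
instance (nums : List Int) (maximumBit : Int) (out : List Int) : Decidable (Spec_getMaximumXor nums maximumBit out) := by unfold Spec_getMaximumXor; infer_instance

-- ===== CLAIM (what is proved, stated in full; the proofs are below) =====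
def Claim_equal_getMaximumXor : Prop := ∀ (nums : List Int) (maximumBit : Int), Dom_getMaximumXor nums maximumBit → Pre_getMaximumXor nums maximumBit → Spec_getMaximumXor nums maximumBit (getMaximumXor nums maximumBit)

def Claim_raises_getMaximumXor : Prop := (∀ (nums : List Int) (maximumBit : Int), Dom_getMaximumXor nums maximumBit → Raises_getMaximumXor nums maximumBit → ¬ Pre_getMaximumXor nums maximumBit) ∧ (Dom_getMaximumXor (pvRaiseWitness_getMaximumXor.1) (pvRaiseWitness_getMaximumXor.2) ∧ Raises_getMaximumXor (pvRaiseWitness_getMaximumXor.1) (pvRaiseWitness_getMaximumXor.2) ∧ getMaximumXor_alt (pvRaiseWitness_getMaximumXor.1) (pvRaiseWitness_getMaximumXor.2) = pvRaiseWitnessOut_getMaximumXor)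

-- ===== LEMMAS AND PROOFS =====

theorem pvBxor_eq_xor (a b : Int) : PySem.Int.bxor a b = Int.xor a b := by
  unfold PySem.Int.bxor Int.xor
  rcases a with m | m <;> rcases b with n | n <;> simp [Int.negSucc_eq] <;> omega

theorem pvBxor_assoc (a b c : Int) :
    PySem.Int.bxor (PySem.Int.bxor a b) c = PySem.Int.bxor a (PySem.Int.bxor b c) := by
  simp only [pvBxor_eq_xor]
  rcases a with m | m <;> rcases b with n | n <;> rcases c with k | k <;>
    simp [Int.xor, Nat.xor_assoc]

theorem pvZero_bxor (a : Int) : PySem.Int.bxor 0 a = a := by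
  rw [PySem.Int.bxor_comm]; exact PySem.Int.bxor_zero a

-- pvOnes k = 2^k - 1
theorem pvOnes_eq (k : Nat) : pvOnes k = 2 ^ k - 1 := by
  induction k with
  | zero => rfl
  | succ n ih =>
      unfold pvOnes at *
      rw [List.replicate_succ', List.foldl_append, ih]
      simp [pow_succ]; ring

-- xor-all of a list
def pvXorAll (l : List Int) : Int := l.foldl PySem.Int.bxor 0

theorem pvXorAll_append (l : List Int) (x : Int) :
    pvXorAll (l ++ [x]) = PySem.Int.bxor (pvXorAll l) x := by
  simp [pvXorAll]

theorem pvFoldlBxor (l : List Int) (a : Int) :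
    l.foldl PySem.Int.bxor a = PySem.Int.bxor a (pvXorAll l) := by
  induction l generalizing a with
  | nil => simp [pvXorAll, PySem.Int.bxor_zero]
  | cons x xs ih =>
      simp only [pvXorAll, List.foldl_cons, pvZero_bxor]
      rw [ih, ih x, pvBxor_assoc]

theorem pvXorAll_cons (x : Int) (xs : List Int) :
    pvXorAll (x :: xs) = PySem.Int.bxor x (pvXorAll xs) := by
  simp only [pvXorAll, List.foldl_cons, pvZero_bxor]
  exact pvFoldlBxor xs x

-- B's prefix fold, generalized
theorem pvPrefixFold (l : List Int) (acc : List Int) (a : Int) :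
    l.foldl (fun (st : List Int × Int) x =>
        (st.1 ++ [PySem.Int.bxor st.2 x], PySem.Int.bxor st.2 x)) (acc, a)
      = (acc ++ (l.foldl (fun (st : List Int × Int) x =>
        (st.1 ++ [PySem.Int.bxor st.2 x], PySem.Int.bxor st.2 x)) ([], a)).1,
        PySem.Int.bxor a (pvXorAll l)) := by
  induction l generalizing acc a with
  | nil => simp [pvXorAll, PySem.Int.bxor_zero]
  | cons x xs ih =>
      simp only [List.foldl_cons, List.nil_append]
      rw [ih, ih (acc := [PySem.Int.bxor a x]), pvXorAll_cons, ← pvBxor_assoc,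
        List.append_assoc]

-- the snoc recursion both sides satisfy: value part of A's second loop
def pvPeel (M : Int) : List Int → Int → List Int
  | [], _ => []
  | x :: xs, p => (M - p) :: pvPeel M xs (PySem.Int.bxor p x)

theorem pvPeel_acc (M : Int) (l : List Int) (acc : List Int) (p : Int) :
    (l.foldl (fun (st : List Int × Int) x =>
        (st.1 ++ [M - st.2], PySem.Int.bxor st.2 x)) (acc, p)).1 = acc ++ pvPeel M l p := by
  induction l generalizing acc p with
  | nil => simp [pvPeel]
  | cons x xs ih => simp [pvPeel, ih]

def pvPrefixes (l : List Int) : List Int :=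
  (l.foldl (fun (st : List Int × Int) x =>
      (st.1 ++ [PySem.Int.bxor st.2 x], PySem.Int.bxor st.2 x)) ([], 0)).1

theorem pvPrefixes_snoc (l : List Int) (x : Int) :
    pvPrefixes (l ++ [x]) = pvPrefixes l ++ [PySem.Int.bxor (pvXorAll l) x] := by
  unfold pvPrefixes
  rw [List.foldl_append, pvPrefixFold l [] 0]
  simp [pvZero_bxor]

theorem pvPeel_eq_prefixes (M : Int) (l : List Int) :
    pvPeel M l.reverse (pvXorAll l) = (pvPrefixes l).reverse.map (fun p => M - p) := by
  induction l using List.reverseRecOn with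
  | nil => simp [pvPeel, pvPrefixes]
  | append_singleton ys y ih =>
      rw [pvPrefixes_snoc, pvXorAll_append]
      simp only [List.reverse_append, List.reverse_cons, List.reverse_nil, List.nil_append,
        List.cons_append, List.map_cons, pvPeel]
      rw [show PySem.Int.bxor (PySem.Int.bxor (pvXorAll ys) y) y = pvXorAll ys from by
            rw [pvBxor_assoc, PySem.Int.bxor_self, PySem.Int.bxor_zero], ih]

-- A's first loop computes pvXorAll nums (nums nonempty)
theorem pvFirstLoop (x : Int) (xs : List Int) :
    (PySem.List.pyRange 1 ((x :: xs).length : Int) 1).foldl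
      (fun p i => PySem.Int.bxor (PySem.List.pyGetD (x :: xs) i 0) p)
      (PySem.List.pyGetD (x :: xs) 0 0)
      = pvXorAll (x :: xs) := by
  rw [PySem.List.foldl_pyRange_pyGetD' (x :: xs) 0 (fun p v => PySem.Int.bxor v p) _ (by norm_num)]
  simp only [Int.toNat_one, List.drop_succ_cons, List.drop_zero, PySem.List.pyGetD_zero_cons]
  show xs.foldl (fun p v => PySem.Int.bxor v p) x = pvXorAll (x :: xs)
  simp only [pvXorAll, List.foldl_cons, pvZero_bxor]
  induction xs generalizing x with
  | nil => rfl
  | cons y ys ih => simp only [List.foldl_cons, PySem.Int.bxor_comm]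

-- the indices n-1-i for i in range(n) read nums in reverse
theorem pvRevIndices (nums : List Int) :
    (PySem.List.pyRange 0 (nums.length : Int) 1).map
      (fun i => PySem.List.pyGetD nums ((nums.length : Int) - 1 - i) 0) = nums.reverse := by
  rw [PySem.List.pyRange_one]
  simp only [Int.sub_zero, Int.toNat_natCast]
  apply List.ext_getElem
  · simp
  · intro k h1 h2
    simp only [List.getElem_map, List.getElem_range, List.getElem_reverse]
    have hk : k < nums.length := by simpa using h1
    have : ((nums.length : Int) - 1 - (0 + (k : Int))) = ((nums.length - 1 - k : Nat) : Int) := by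
      omega
    rw [this, PySem.List.pyGetD_natCast, List.getD_eq_getElem _ _ (by omega)]

-- A's second loop as a fold over nums.reverse
theorem pvSecondLoop (nums : List Int) (M p : Int) :
    ((PySem.List.pyRange 0 (nums.length : Int) 1).foldl
      (fun (st : List Int × Int) i =>
        (st.1 ++ [M - st.2],
         PySem.Int.bxor st.2 (PySem.List.pyGetD nums ((nums.length : Int) - 1 - i) 0)))
      ([], p)).1 = pvPeel M nums.reverse p := by
  have hmap :
      (PySem.List.pyRange 0 (nums.length : Int) 1).foldl
        (fun (st : List Int × Int) i =>
          (st.1 ++ [M - st.2],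
           PySem.Int.bxor st.2 (PySem.List.pyGetD nums ((nums.length : Int) - 1 - i) 0)))
        ([], p)
      = (((PySem.List.pyRange 0 (nums.length : Int) 1).map
          (fun i => PySem.List.pyGetD nums ((nums.length : Int) - 1 - i) 0)).foldl
        (fun (st : List Int × Int) x => (st.1 ++ [M - st.2], PySem.Int.bxor st.2 x)) ([], p)) := by
    rw [List.foldl_map]
  rw [hmap, pvRevIndices, pvPeel_acc]
  simp

-- ===== VERDICT (by name: the statement is the Claim_ definition above) =====
theorem getMaximumXor_spec : Claim_equal_getMaximumXor := by
  intro nums maximumBit _hdom hpre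
  obtain ⟨hne, _hmb⟩ := hpre
  unfold Spec_getMaximumXor getMaximumXor getMaximumXor_alt
  obtain ⟨x, xs, rfl⟩ := List.exists_cons_of_ne_nil hne
  simp only
  rw [pvFirstLoop, pvSecondLoop, pvOnes_eq, pvPeel_eq_prefixes]
  rfl

@[simp] theorem getMaximumXor_raises : Claim_raises_getMaximumXor := by
  unfold Claim_raises_getMaximumXor
  refine ⟨?_, by decide, by decide, by decide⟩
  intro nums maximumBit _ hr hp
  rcases hr with ⟨h0, h1 | h2⟩
  · exact hp.1 h1
  · have := hp.2; omega
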